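-- pv_equiv track=rewrite | github.com/parkchanhee/hisat2 | gene_statistics.py | genes_groupby_biotype
-- ===== SOURCE A (Python) =====
-- def genes_groupby_biotype(genes):
--     group_biotype = {}
--
--     for key, value in genes.items():
--         biotype = value[2]
--
--         if biotype in group_biotype:
--             group_biotype[biotype].append(key)
--         else:
--             group_biotype[biotype] = [key]
--
--     return group_biotype
-- ===== SOURCE B (Python) =====
-- def genes_groupby_biotype(genes):
--     # two-pass: first collect the distinct biotypes in first-occurrence order,
--     # then build each group by one filtering scan per biotype
--     order = list(dict.fromkeys(v[2] for v in genes.values()))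
--     return {bt: [k for k, v in genes.items() if v[2] == bt] for bt in order}
-- ===== Notes on version B (the rewrite author's own statement) =====
-- stated objective: alternative
-- what changed: Replaces the single-pass hash-bucketing loop (membership test then append/insert per item) by a two-pass strategy: deduplicate the biotypes in first-occurrence order, then build each group with one filtering scan per biotype.
import Mathlib
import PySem

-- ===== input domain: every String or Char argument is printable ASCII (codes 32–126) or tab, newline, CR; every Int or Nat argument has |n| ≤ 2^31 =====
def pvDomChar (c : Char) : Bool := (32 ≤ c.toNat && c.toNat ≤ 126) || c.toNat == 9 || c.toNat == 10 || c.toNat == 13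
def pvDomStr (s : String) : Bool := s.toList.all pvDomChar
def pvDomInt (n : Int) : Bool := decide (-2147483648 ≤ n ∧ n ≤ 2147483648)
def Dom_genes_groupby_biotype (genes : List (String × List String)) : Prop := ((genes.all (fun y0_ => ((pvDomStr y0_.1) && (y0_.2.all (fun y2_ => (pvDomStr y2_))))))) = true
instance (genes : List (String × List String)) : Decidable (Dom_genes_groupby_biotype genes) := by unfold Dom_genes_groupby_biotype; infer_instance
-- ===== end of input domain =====

-- B replaces A's single-pass bucketing loop by a dedup-then-filter-per-biotype two-pass
-- strategy (objective: alternative, same result, no speed claim).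

-- value[2]; exact under Pre_ (every value has length ≥ 3; Python raises IndexError otherwise,
-- and those inputs are excluded by Pre_genes_groupby_biotype)
def pvBt (v : List String) : String := (PySem.List.pyGet? v 2).getD ""

-- ===== PORT A =====
def genes_groupby_biotype (genes : List (String × List String)) : List (String × List String) :=
  (genes.foldl (fun d kv =>
      let biotype := pvBt kv.2
      if d.contains biotype then d.modify biotype [] (fun l => l ++ [kv.1])
      else d.insert biotype [kv.1])
    PySem.Dict.empty).items

-- ===== PORT B =====
def genes_groupby_biotype_alt (genes : List (String × List String)) : List (String × List String) :=
  let order := PySem.List.dedup (genes.map (fun kv => pvBt kv.2))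
  order.map (fun bt => (bt, (genes.filter (fun kv => pvBt kv.2 == bt)).map Prod.fst))

-- ===== PRECONDITION & SPEC =====
-- Pre_ excludes (a) entries whose value list is shorter than 3, on which Python A raises
-- IndexError, and (b) duplicate keys, which cannot occur in the Python dict this assoc list
-- encodes (a dict literal silently collapses them).
def Pre_genes_groupby_biotype (genes : List (String × List String)) : Prop :=
  (∀ kv ∈ genes, 3 ≤ kv.2.length) ∧ (genes.map Prod.fst).Nodup

instance (genes : List (String × List String)) : Decidable (Pre_genes_groupby_biotype genes) := by
  unfold Pre_genes_groupby_biotype; infer_instance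

def pvWitness_genes_groupby_biotype : (List (String × List String)) :=
  [("g1", ["c1", "p", "coding"]), ("g2", ["c1", "q", "rna"]), ("g3", ["c2", "r", "coding"])]

def Spec_genes_groupby_biotype (genes : List (String × List String)) (out : List (String × List String)) : Prop := out = genes_groupby_biotype_alt genes
instance (genes : List (String × List String)) (out : List (String × List String)) : Decidable (Spec_genes_groupby_biotype genes out) := by unfold Spec_genes_groupby_biotype; infer_instance

-- ===== CLAIM (what is proved, stated in full; the proofs are below) =====
def Claim_equal_genes_groupby_biotype : Prop := ∀ (genes : List (String × List String)), Dom_genes_groupby_biotype genes → Pre_genes_groupby_biotype genes → Spec_genes_groupby_biotype genes (genes_groupby_biotype genes)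

-- ===== LEMMAS AND PROOFS =====

-- A's branch (membership test, then append or fresh singleton) is exactly Dict.modify
lemma pv_step_eq (d : PySem.Dict String (List String)) (bt k : String) :
    (if d.contains bt then d.modify bt [] (fun l => l ++ [k]) else d.insert bt [k])
      = d.modify bt [] (fun l => l ++ [k]) := by
  cases h : d.contains bt with
  | true => simp
  | false => simp [PySem.Dict.modify, PySem.Dict.getD_of_not_contains d [] h]

lemma pv_main (genes : List (String × List String)) :
    genes_groupby_biotype genes = genes_groupby_biotype_alt genes := by
  unfold genes_groupby_biotype genes_groupby_biotype_alt
  have hstep : (fun (d : PySem.Dict String (List String)) (kv : String × List String) =>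
      let biotype := pvBt kv.2
      if d.contains biotype then d.modify biotype [] (fun l => l ++ [kv.1])
      else d.insert biotype [kv.1])
      = fun d kv => d.modify (pvBt kv.2) [] (fun l => l ++ [kv.1]) := by
    funext d kv; exact pv_step_eq d (pvBt kv.2) kv.1
  rw [hstep]
  set D := genes.foldl (fun d kv => d.modify (pvBt kv.2) [] (fun l => l ++ [kv.1]))
      PySem.Dict.empty with hD
  have hnd : D.keys.Nodup := by
    rw [hD]
    exact PySem.Dict.nodup_keys_foldl_modify_key genes (fun kv => pvBt kv.2) []
      (fun d kv l => l ++ [kv.1]) PySem.Dict.empty PySem.Dict.nodup_keys_empty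
  have hkeys : D.keys = PySem.Set.ofList (genes.map (fun kv => pvBt kv.2)) := by
    rw [hD, PySem.Dict.keys_foldl_modify_key]
    simp [PySem.Dict.keys_empty, PySem.Set.update_nil_left]
  have hgetD : ∀ c : String,
      D.getD c [] = (genes.filter (fun kv => pvBt kv.2 == c)).map Prod.fst := by
    intro c
    have hfold : D = (genes.map (fun kv => (pvBt kv.2, kv.1))).foldl
        (fun d p => d.modify p.1 [] (fun l => l ++ [p.2])) PySem.Dict.empty := by
      rw [hD, List.foldl_map]
    rw [hfold, PySem.Dict.getD_foldl_modify_append]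
    simp [PySem.Dict.getD_empty, List.filter_map, Function.comp_def]
  rw [PySem.Dict.items_eq_map_keys D hnd [], hkeys]
  simp only [PySem.List.dedup_eq_ofList]
  exact List.map_congr_left (fun c _ => by rw [hgetD c])

-- ===== VERDICT (by name: the statement is the Claim_ definition above) =====
theorem genes_groupby_biotype_spec : Claim_equal_genes_groupby_biotype := by
  intro genes _ _
  unfold Spec_genes_groupby_biotype
  exact pv_main genes
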